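-- pv_equiv track=rewrite | github.com/Pedram-Fdi/CRP-PLT-SDDP | Tool.py | Transform3d
-- ===== SOURCE A (Python) =====
-- def Transform3d(array, dimension1, dimension2, dimension3):
--     if len(array) != dimension1 * dimension2 * dimension3:
--         raise ValueError("Array size does not match the specified dimensions.")
--
--     result = [[[
--         array[i * (dimension2 * dimension3) + j * dimension3 + k]
--             for k in range(dimension3)]
--                 for j in range(dimension2)]
--                     for i in range(dimension1)]
--
--     return result
-- ===== SOURCE B (Python) =====
-- def Transform3d(array, dimension1, dimension2, dimension3):
--     if len(array) != dimension1 * dimension2 * dimension3: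
--         raise ValueError("Array size does not match the specified dimensions.")
--
--     result = []
--     off = 0
--     for i in range(dimension1):
--         plane = []
--         for j in range(dimension2):
--             plane.append(list(array[off:off + dimension3]))
--             off += dimension3
--         result.append(plane)
--     return result
-- ===== Notes on version B (the rewrite author's own statement) =====
-- stated objective: alternative
-- what changed: B partitions the array into contiguous dimension3-sized slices with a running offset (appending one block per inner step) instead of A's triple comprehension computing i*d2*d3+j*d3+k for every element.
import Mathlib
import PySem

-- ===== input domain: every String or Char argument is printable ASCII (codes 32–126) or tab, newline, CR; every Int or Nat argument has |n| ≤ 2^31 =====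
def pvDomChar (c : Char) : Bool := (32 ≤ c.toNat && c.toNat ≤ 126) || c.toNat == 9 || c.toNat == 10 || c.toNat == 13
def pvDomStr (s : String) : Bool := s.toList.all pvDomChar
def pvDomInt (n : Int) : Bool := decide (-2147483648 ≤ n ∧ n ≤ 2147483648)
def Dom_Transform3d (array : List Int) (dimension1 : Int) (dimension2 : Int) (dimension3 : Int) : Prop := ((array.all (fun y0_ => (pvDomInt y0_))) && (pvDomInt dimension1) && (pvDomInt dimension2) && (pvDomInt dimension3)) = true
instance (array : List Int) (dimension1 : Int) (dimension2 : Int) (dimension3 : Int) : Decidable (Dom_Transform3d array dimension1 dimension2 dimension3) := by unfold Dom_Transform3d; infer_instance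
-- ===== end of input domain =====

-- B reshapes by slicing the array into contiguous dimension3-sized blocks with a running
-- offset, instead of A's triple comprehension with per-element index arithmetic (alternative
-- decomposition, same cost).

-- ===== PORT A =====
-- the 'raise ValueError' branch (length mismatch) is excluded by Pre_; the port returns [] there
def Transform3d (array : List Int) (dimension1 : Int) (dimension2 : Int) (dimension3 : Int) : List (List (List Int)) :=
  if (array.length : Int) ≠ dimension1 * dimension2 * dimension3 then []
  else
    (PySem.List.pyRange 0 dimension1 1).map (fun i =>
      (PySem.List.pyRange 0 dimension2 1).map (fun j =>
        (PySem.List.pyRange 0 dimension3 1).map (fun k =>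
          PySem.List.pyGetD array (i * (dimension2 * dimension3) + j * dimension3 + k) 0)))

-- ===== PORT B =====
-- same ValueError guard, then the running-offset double loop of Source B
def Transform3d_alt (array : List Int) (dimension1 : Int) (dimension2 : Int) (dimension3 : Int) : List (List (List Int)) :=
  if (array.length : Int) ≠ dimension1 * dimension2 * dimension3 then []
  else
    ((PySem.List.pyRange 0 dimension1 1).foldl
      (fun (acc : List (List (List Int)) × Int) (_i : Int) =>
        let p := (PySem.List.pyRange 0 dimension2 1).foldl
          (fun (q : List (List Int) × Int) (_j : Int) =>
            (q.1 ++ [PySem.List.slice array (some q.2) (some (q.2 + dimension3))], q.2 + dimension3))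
          (([] : List (List Int)), acc.2)
        (acc.1 ++ [p.1], p.2))
      (([] : List (List (List Int))), (0 : Int))).1

-- ===== PRECONDITION & SPEC =====
-- Pre_ excludes exactly the inputs where A raises ValueError (length ≠ d1*d2*d3)
def Pre_Transform3d (array : List Int) (dimension1 : Int) (dimension2 : Int) (dimension3 : Int) : Prop :=
  (array.length : Int) = dimension1 * dimension2 * dimension3
instance (array : List Int) (dimension1 : Int) (dimension2 : Int) (dimension3 : Int) : Decidable (Pre_Transform3d array dimension1 dimension2 dimension3) := by unfold Pre_Transform3d; infer_instance

def pvWitness_Transform3d : List Int × Int × Int × Int := ([1, 2, 3, 4, 5, 6], 1, 2, 3)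

def Spec_Transform3d (array : List Int) (dimension1 : Int) (dimension2 : Int) (dimension3 : Int) (out : List (List (List Int))) : Prop := out = Transform3d_alt array dimension1 dimension2 dimension3
instance (array : List Int) (dimension1 : Int) (dimension2 : Int) (dimension3 : Int) (out : List (List (List Int))) : Decidable (Spec_Transform3d array dimension1 dimension2 dimension3 out) := by unfold Spec_Transform3d; infer_instance

-- ===== CLAIM (what is proved, stated in full; the proofs are below) =====
def Claim_equal_Transform3d : Prop := ∀ (array : List Int) (dimension1 : Int) (dimension2 : Int) (dimension3 : Int), Dom_Transform3d array dimension1 dimension2 dimension3 → Pre_Transform3d array dimension1 dimension2 dimension3 → Spec_Transform3d array dimension1 dimension2 dimension3 (Transform3d array dimension1 dimension2 dimension3)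

-- ===== LEMMAS AND PROOFS =====

-- B's inner loop over any driving list: appends one contiguous slice per step, advancing the offset
theorem innerB_char (array : List Int) (d3 : Int) (l : List Int) :
    ∀ (acc : List (List Int)) (off : Int),
      l.foldl (fun (q : List (List Int) × Int) (_j : Int) =>
          (q.1 ++ [PySem.List.slice array (some q.2) (some (q.2 + d3))], q.2 + d3)) (acc, off)
        = (acc ++ (List.range l.length).map
              (fun (j : Nat) => PySem.List.slice array (some (off + (j : Int) * d3)) (some (off + (j : Int) * d3 + d3))),
           off + l.length * d3) := by
  induction l with
  | nil => intro acc off; simp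
  | cons x xs ih =>
    intro acc off
    simp only [List.foldl_cons, ih, Prod.mk.injEq, List.length_cons]
    refine ⟨?_, by push_cast; ring⟩
    rw [List.range_succ_eq_map, List.map_cons, List.map_map,
        List.append_assoc, List.singleton_append]
    congr 1
    congr 1
    · norm_num
    · apply List.map_congr_left
      intro j _
      simp only [Function.comp]
      congr 2 <;> push_cast <;> ring

-- B's outer loop over any driving list
theorem outerB_char (array : List Int) (d2 d3 : Int) (l : List Int) :
    ∀ (acc : List (List (List Int))) (off : Int),
      l.foldl (fun (a : List (List (List Int)) × Int) (_i : Int) =>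
          let p := (PySem.List.pyRange 0 d2 1).foldl
            (fun (q : List (List Int) × Int) (_j : Int) =>
              (q.1 ++ [PySem.List.slice array (some q.2) (some (q.2 + d3))], q.2 + d3))
            (([] : List (List Int)), a.2)
          (a.1 ++ [p.1], p.2)) (acc, off)
        = (acc ++ (List.range l.length).map
              (fun (i : Nat) => (List.range (PySem.List.pyRange 0 d2 1).length).map
                (fun (j : Nat) => PySem.List.slice array
                  (some (off + ((i : Int) * ((PySem.List.pyRange 0 d2 1).length : Int) + (j : Int)) * d3))
                  (some (off + ((i : Int) * ((PySem.List.pyRange 0 d2 1).length : Int) + (j : Int)) * d3 + d3)))),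
           off + l.length * ((PySem.List.pyRange 0 d2 1).length * d3)) := by
  induction l with
  | nil => intro acc off; simp
  | cons x xs ih =>
    intro acc off
    simp only [List.foldl_cons]
    rw [ih, innerB_char]
    simp only [Prod.mk.injEq, List.length_cons, List.nil_append]
    refine ⟨?_, by push_cast; ring⟩
    rw [List.range_succ_eq_map, List.map_cons, List.map_map,
        List.append_assoc, List.singleton_append]
    congr 1
    congr 1
    · apply List.map_congr_left
      intro j _
      congr 2 <;> push_cast <;> ring
    · apply List.map_congr_left
      intro i _
      simp only [Function.comp]
      apply List.map_congr_left
      intro j _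
      congr 2 <;> push_cast <;> ring

-- a contiguous slice equals A's index comprehension, under in-bounds offsets
theorem slice_eq_map (array : List Int) (d3 off : Int) (h0 : 0 ≤ off) (h3 : 0 ≤ d3)
    (hend : off + d3 ≤ (array.length : Int)) :
    PySem.List.slice array (some off) (some (off + d3))
      = (PySem.List.pyRange 0 d3 1).map (fun k => PySem.List.pyGetD array (off + k) 0) := by
  rw [PySem.List.slice_toNat _ h0 (by omega), PySem.List.pyRange_one]
  apply List.ext_getElem
  · simp; omega
  · intro i h1 h2
    have hi : i < d3.toNat := by
      simp only [List.length_map, List.length_range] at h2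
      omega
    have hoi : off.toNat + i < array.length := by omega
    simp only [List.getElem_take, List.getElem_drop, List.getElem_map, List.getElem_range]
    rw [PySem.List.pyGetD_eq_getElem array 0 (by omega) (by push_cast; omega)]
    congr 1
    omega

-- ===== VERDICT (by name: the statement is the Claim_ definition above) =====
theorem Transform3d_spec : Claim_equal_Transform3d := by
  intro array d1 d2 d3 _hdom hpre
  unfold Spec_Transform3d Transform3d Transform3d_alt
  rw [if_neg (by exact fun h => h hpre), if_neg (by exact fun h => h hpre)]
  rw [outerB_char]
  simp only [List.nil_append]
  by_cases h1 : d1 ≤ 0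
  · rw [PySem.List.pyRange_one_eq_nil h1]
    simp
  push_neg at h1
  by_cases h2 : d2 ≤ 0
  · rw [PySem.List.pyRange_one_eq_nil (a := 0) (b := d2) h2]
    simp [PySem.List.pyRange_one, List.eq_replicate_iff]
  push_neg at h2
  have h3 : 0 ≤ d3 := by
    by_contra h3
    push_neg at h3
    have hneg : d1 * d2 * d3 < 0 := mul_neg_of_pos_of_neg (mul_pos h1 h2) h3
    have hnn : (0 : Int) ≤ (array.length : Int) := Int.natCast_nonneg _
    unfold Pre_Transform3d at hpre
    omega
  unfold Pre_Transform3d at hpre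
  rw [PySem.List.length_pyRange_one 0 d2, PySem.List.length_pyRange_one 0 d1]
  simp only [Int.sub_zero]
  have hlen2 : ((d2.toNat : Nat) : Int) = d2 := by omega
  rw [PySem.List.pyRange_one 0 d1, PySem.List.pyRange_one 0 d2]
  simp only [Int.sub_zero, List.map_map]
  apply List.map_congr_left
  intro i hiN
  rw [List.mem_range] at hiN
  simp only [Function.comp]
  apply List.map_congr_left
  intro j hjN
  rw [List.mem_range] at hjN
  simp only [Function.comp]
  have hjI : (j : Int) < d2 := by omega
  have hiI : (i : Int) < d1 := by omega
  have hoff0 : (0 : Int) ≤ ((i : Int) * (d2.toNat : Int) + (j : Int)) * d3 := by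
    rw [hlen2]; positivity
  have hoffend : ((i : Int) * (d2.toNat : Int) + (j : Int)) * d3 + d3 ≤ (array.length : Int) := by
    rw [hlen2, hpre]
    have h4 : (i : Int) * d2 + (j : Int) + 1 ≤ d1 * d2 := by
      nlinarith [mul_le_mul_of_nonneg_right (show (i : Int) ≤ d1 - 1 by omega) (le_of_lt h2)]
    nlinarith [mul_le_mul_of_nonneg_right h4 h3]
  simp only [zero_add]
  have hs := slice_eq_map array d3 (((i : Int) * (d2.toNat : Int) + (j : Int)) * d3) hoff0 h3 hoffend
  rw [hs]
  apply List.map_congr_left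
  intro k _
  congr 1
  rw [hlen2]
  push_cast
  ring
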